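-- pv_equiv track=rewrite | github.com/Lordsisodia/siso-engine | workflows/engine/pipeline/token_compressor.py | _summarize_python
-- ===== SOURCE A (Python) =====
-- from typing import Dict, Any, List, Optional, Tuple, Callable
--
-- def _summarize_python(lines: List[str]) -> List[str]:
--     """Extract Python function/class signatures."""
--     summary = []
--     for line in lines:
--         stripped = line.strip()
--         # Function/class definitions
--         if stripped.startswith(('def ', 'class ')):
--             summary.append(line)
--         # Import statements
--         elif stripped.startswith('import ') or stripped.startswith('from '):
--             summary.append(line)
--         # Decorators
--         elif stripped.startswith('@'):
--             summary.append(line)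
--         # Docstring start
--         elif stripped.startswith('"""') or stripped.startswith("'''"):
--             summary.append(line)
--             break  # Only show first line of docstring
--
--     return summary[:20]  # Limit to 20 lines
-- ===== SOURCE B (Python) =====
-- from typing import List
--
-- _KEEP = ('def ', 'class ', 'import ', 'from ', '@', '"""', "'''")
--
-- def _summarize_python(lines: List[str]) -> List[str]:
--     end = next((i + 1 for i, line in enumerate(lines)
--                 if line.strip().startswith(('"""', "'''"))), len(lines))
--     return [line for line in lines[:end] if line.strip().startswith(_KEEP)][:20]
-- ===== Notes on version B (the rewrite author's own statement) =====
-- stated objective: simpler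
-- what changed: Replaced the stateful accumulate-with-early-break loop by a two-pass structure: first find the boundary (index after the first docstring line, or the end), then filter the truncated list with one keep-prefix predicate and cap at 20.
import Mathlib
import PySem

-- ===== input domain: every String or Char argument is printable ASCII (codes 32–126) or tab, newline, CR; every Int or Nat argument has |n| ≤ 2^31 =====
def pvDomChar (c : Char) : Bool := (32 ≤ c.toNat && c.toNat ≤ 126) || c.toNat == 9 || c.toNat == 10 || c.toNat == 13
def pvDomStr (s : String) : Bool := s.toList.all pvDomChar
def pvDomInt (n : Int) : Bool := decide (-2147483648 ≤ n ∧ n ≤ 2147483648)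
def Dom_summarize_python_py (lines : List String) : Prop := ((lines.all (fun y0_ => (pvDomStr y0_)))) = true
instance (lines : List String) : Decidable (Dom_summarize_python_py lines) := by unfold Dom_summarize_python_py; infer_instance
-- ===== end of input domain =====

-- B changes the decomposition: boundary-then-filter two passes instead of A's stateful loop with an early break (simpler, same cost).

-- ===== PORT A =====
-- the for-loop with break, as structural recursion building the accumulator's contents
def pvALoop : List String → List String
  | [] => []
  | line :: rest =>
    let stripped := PySem.Str.strip line
    if PySem.Str.startswith stripped "def " || PySem.Str.startswith stripped "class " then
      line :: pvALoop rest
    else if PySem.Str.startswith stripped "import " || PySem.Str.startswith stripped "from " then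
      line :: pvALoop rest
    else if PySem.Str.startswith stripped "@" then
      line :: pvALoop rest
    else if PySem.Str.startswith stripped "\"\"\"" || PySem.Str.startswith stripped "'''" then
      [line]  -- append then break
    else
      pvALoop rest

def summarize_python_py (lines : List String) : List String :=
  PySem.List.slice (pvALoop lines) none (some 20)  -- summary[:20]

-- ===== PORT B =====
def pvIsDoc (line : String) : Bool :=
  PySem.Str.startswith (PySem.Str.strip line) "\"\"\"" || PySem.Str.startswith (PySem.Str.strip line) "'''"

-- line.strip().startswith(_KEEP), the 7-prefix tuple
def pvKeep (line : String) : Bool :=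
  let s := PySem.Str.strip line
  PySem.Str.startswith s "def " || PySem.Str.startswith s "class " ||
  PySem.Str.startswith s "import " || PySem.Str.startswith s "from " ||
  PySem.Str.startswith s "@" || PySem.Str.startswith s "\"\"\"" || PySem.Str.startswith s "'''"

def summarize_python_py_alt (lines : List String) : List String :=
  let endIdx : Nat := match lines.findIdx? pvIsDoc with
    | some i => i + 1
    | none => lines.length
  PySem.List.slice ((PySem.List.slice lines none (some (endIdx : Int))).filter pvKeep) none (some 20)

-- ===== PRECONDITION & SPEC =====
def Spec_summarize_python_py (lines : List String) (out : List String) : Prop := out = summarize_python_py_alt lines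
instance (lines : List String) (out : List String) : Decidable (Spec_summarize_python_py lines out) := by unfold Spec_summarize_python_py; infer_instance

-- ===== CLAIM (what is proved, stated in full; the proofs are below) =====
def Claim_equal_summarize_python_py : Prop := ∀ (lines : List String), Dom_summarize_python_py lines → Spec_summarize_python_py lines (summarize_python_py lines)

-- ===== LEMMAS AND PROOFS =====

-- two prefixes with different first characters cannot both be prefixes of the same string
theorem pv_sw_clash (s : List Char) (c d : Char) (p q : List Char)
    (hcd : c ≠ d) (h : PySem.Chars.startswith s (c :: p) = true) :
    PySem.Chars.startswith s (d :: q) = false := by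
  rw [PySem.Chars.startswith_iff] at h
  rw [Bool.eq_false_iff]
  intro h2
  rw [PySem.Chars.startswith_iff] at h2
  obtain ⟨t1, ht1⟩ := h
  obtain ⟨t2, ht2⟩ := h2
  rw [← ht2] at ht1
  simp only [List.cons_append, List.cons.injEq] at ht1
  exact hcd ht1.1

theorem pv_doc_not_other (l : String) (h : pvIsDoc l = true) (c : Char) (p : List Char)
    (hc : c ≠ '"' ∧ c ≠ '\'') :
    PySem.Chars.startswith (PySem.Chars.strip l.toList) (c :: p) = false := by
  unfold pvIsDoc at h
  simp only [PySem.Str.startswith_eq, PySem.Str.toList_strip, Bool.or_eq_true] at h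
  rcases h with h' | h'
  · exact pv_sw_clash _ '"' c _ p (fun e => hc.1 e.symm) (by simpa using h')
  · exact pv_sw_clash _ '\'' c _ p (fun e => hc.2 e.symm) (by simpa using h')

set_option maxHeartbeats 1000000 in
theorem pv_main (lines : List String) :
    pvALoop lines =
      (lines.take (match lines.findIdx? pvIsDoc with
        | some i => i + 1
        | none => lines.length)).filter pvKeep := by
  induction lines with
  | nil => rfl
  | cons l rest ih =>
    by_cases hdoc : pvIsDoc l = true
    · have hd := hdoc
      unfold pvIsDoc at hd
      have h1 : PySem.Str.startswith (PySem.Str.strip l) "def " = false := by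
        have := pv_doc_not_other l hdoc 'd' "ef ".toList (by decide)
        simp only [PySem.Str.startswith_eq, PySem.Str.toList_strip]
        simpa using this
      have h2 : PySem.Str.startswith (PySem.Str.strip l) "class " = false := by
        have := pv_doc_not_other l hdoc 'c' "lass ".toList (by decide)
        simp only [PySem.Str.startswith_eq, PySem.Str.toList_strip]
        simpa using this
      have h3 : PySem.Str.startswith (PySem.Str.strip l) "import " = false := by
        have := pv_doc_not_other l hdoc 'i' "mport ".toList (by decide)
        simp only [PySem.Str.startswith_eq, PySem.Str.toList_strip]
        simpa using this
      have h4 : PySem.Str.startswith (PySem.Str.strip l) "from " = false := by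
        have := pv_doc_not_other l hdoc 'f' "rom ".toList (by decide)
        simp only [PySem.Str.startswith_eq, PySem.Str.toList_strip]
        simpa using this
      have h5 : PySem.Str.startswith (PySem.Str.strip l) "@" = false := by
        have := pv_doc_not_other l hdoc '@' [] (by decide)
        simp only [PySem.Str.startswith_eq, PySem.Str.toList_strip]
        simpa using this
      have hk : pvKeep l = true := by
        unfold pvKeep
        rcases Bool.or_eq_true_iff.1 hd with h | h <;> simp at h <;> simp [h]
      simp only [List.findIdx?_cons, hdoc, if_true]
      rw [pvALoop]
      simp only [h1, h2, h3, h4, h5, hd, Bool.or_self, Bool.false_eq_true, if_false, if_true]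
      simp [hk]
    · rw [Bool.not_eq_true] at hdoc
      have hdocf := hdoc
      unfold pvIsDoc at hdocf
      have hkeq : pvKeep l =
          (PySem.Str.startswith (PySem.Str.strip l) "def " ||
           PySem.Str.startswith (PySem.Str.strip l) "class " ||
           PySem.Str.startswith (PySem.Str.strip l) "import " ||
           PySem.Str.startswith (PySem.Str.strip l) "from " ||
           PySem.Str.startswith (PySem.Str.strip l) "@") := by
        rcases Bool.or_eq_false_iff.1 hdocf with ⟨e1, e2⟩
        unfold pvKeep
        simp at e1 e2
        simp [e1, e2]
      simp only [List.findIdx?_cons, hdoc, Bool.false_eq_true, if_false]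
      have hb : (match (rest.findIdx? pvIsDoc).map (fun i => i + 1) with
          | some i => i + 1
          | none => (l :: rest).length) =
          (match rest.findIdx? pvIsDoc with
          | some i => i + 1
          | none => rest.length) + 1 := by
        cases rest.findIdx? pvIsDoc <;> simp
      rw [hb, List.take_succ_cons, List.filter_cons]
      rw [pvALoop]
      rw [← ih]
      simp only [hdocf, Bool.false_eq_true, if_false]
      rw [hkeq]
      split_ifs with a b c <;> simp_all

-- ===== VERDICT (by name: the statement is the Claim_ definition above) =====
theorem summarize_python_py_spec : Claim_equal_summarize_python_py := by
  intro lines _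
  unfold Spec_summarize_python_py summarize_python_py summarize_python_py_alt
  rw [PySem.List.slice_to _ (by norm_num : (0:Int) ≤ 20),
      PySem.List.slice_to _ (by norm_num : (0:Int) ≤ 20),
      PySem.List.slice_to _ (by positivity), pv_main]
  norm_num
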